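-- pv_equiv track=rewrite | github.com/mitsuo0114/competitive_programming | python/atcoder/Beginner114/C.py | solve
-- ===== SOURCE A (Python) =====
-- from itertools import product
--
-- def solve(N):
--     sum = 0
--     for k in range(1, 10):
--         for i in product('357', repeat=k):
--             if '3' in i and '5' in i and '7' in i:
--                 d = int("".join(list(i)))
--                 if d <= N:
--                     sum += 1
--     return sum
-- ===== SOURCE B (Python) =====
-- def full_count(m, r):
--     # number of length-m strings over {3,5,7} using all of the r still-missing digits
--     if r == 0:
--         return 3 ** m
--     if r == 1:
--         return 3 ** m - 2 ** m
--     if r == 2: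
--         return 3 ** m - 2 * 2 ** m + 1
--     return 3 ** m - 3 * 2 ** m + 3 - 0 ** m
--
-- def count(m, v, has3, has5, has7, N):
--     # count completions of prefix-value v by m more digits from {3,5,7}
--     # whose final value is <= N and which end up containing 3, 5 and 7
--     p = 10 ** m
--     rep = (p - 1) // 9
--     lo = v * p + 3 * rep
--     hi = v * p + 7 * rep
--     if lo > N:
--         return 0
--     if hi <= N:
--         return full_count(m, (not has3) + (not has5) + (not has7))
--     return (count(m - 1, v * 10 + 3, True, has5, has7, N)
--             + count(m - 1, v * 10 + 5, has3, True, has7, N)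
--             + count(m - 1, v * 10 + 7, has3, has5, True, N))
--
-- def solve(N):
--     return sum(count(k, 0, False, False, False, N) for k in range(1, 10))
-- ===== Notes on version B (the rewrite author's own statement) =====
-- stated objective: faster
-- what changed: B replaces A's exhaustive enumeration of every digit tuple over the three allowed digits with a pruned digit recursion: subtrees whose numbers all lie below N are counted by inclusion-exclusion closed forms keyed on the still-missing digits, subtrees entirely above N contribute nothing, and only the single boundary path is descended.
import Mathlib
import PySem

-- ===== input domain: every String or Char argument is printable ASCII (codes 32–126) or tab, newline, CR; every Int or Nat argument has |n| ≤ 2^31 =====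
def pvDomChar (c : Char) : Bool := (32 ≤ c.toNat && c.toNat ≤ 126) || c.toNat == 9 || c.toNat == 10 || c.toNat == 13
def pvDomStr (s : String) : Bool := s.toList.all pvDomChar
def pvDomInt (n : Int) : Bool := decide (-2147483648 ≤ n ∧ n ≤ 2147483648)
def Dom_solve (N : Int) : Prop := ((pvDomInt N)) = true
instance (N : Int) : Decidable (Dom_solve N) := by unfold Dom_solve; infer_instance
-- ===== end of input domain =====

-- B replaces A's exhaustive enumeration of every digit tuple over {3,5,7} by a pruned digit
-- recursion with inclusion-exclusion closed forms for fully-decided subtrees (objective: faster).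

-- ===== PORT A =====
-- itertools.product('357', repeat=k): k-tuples of the characters '3','5','7',
-- leftmost position varying slowest (lexicographic), as lists of Chars.
def prodA : Nat → List (List Char)
  | 0 => [[]]
  | k+1 => ['3','5','7'].flatMap (fun c => (prodA k).map (c :: ·))

def solve (N : Int) : Int :=
  (PySem.List.pyRange 1 10 1).foldl (fun sum k =>
    (prodA k.toNat).foldl (fun sum i =>
      if i.contains '3' && i.contains '5' && i.contains '7' then
        -- d = int("".join(list(i))); int() cannot raise here: the guard forces i to be a
        -- nonempty list of decimal digits, so ofChars? is `some` and the default is never used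
        let d : Int := (PySem.Int.ofChars? i).getD 0
        if d ≤ N then sum + 1 else sum
      else sum) sum) 0

-- ===== PORT B =====
def full_count (m : Nat) (r : Nat) : Int :=
  if r = 0 then 3 ^ m
  else if r = 1 then 3 ^ m - 2 ^ m
  else if r = 2 then 3 ^ m - 2 * 2 ^ m + 1
  else 3 ^ m - 3 * 2 ^ m + 3 - 0 ^ m

def count (m : Nat) (v : Int) (has3 has5 has7 : Bool) (N : Int) : Int :=
  let p : Int := 10 ^ m
  let rep : Int := PySem.Int.floordiv (p - 1) 9
  let lo : Int := v * p + 3 * rep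
  let hi : Int := v * p + 7 * rep
  if lo > N then 0
  else if hi ≤ N then
    full_count m ((if has3 then 0 else 1) + (if has5 then 0 else 1) + (if has7 then 0 else 1))
  else
    match m with
    | 0 => 0  -- unreachable: for m = 0, lo = hi = v, so one of the two branches above fires
    | Nat.succ m' =>
        count m' (v * 10 + 3) true has5 has7 N
      + count m' (v * 10 + 5) has3 true has7 N
      + count m' (v * 10 + 7) has3 has5 true N

def solve_alt (N : Int) : Int :=
  ((PySem.List.pyRange 1 10 1).map (fun k => count k.toNat 0 false false false N)).sum

-- ===== PRECONDITION & SPEC =====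
def Spec_solve (N : Int) (out : Int) : Prop := out = solve_alt N
instance (N : Int) (out : Int) : Decidable (Spec_solve N out) := by unfold Spec_solve; infer_instance

-- ===== CLAIM (what is proved, stated in full; the proofs are below) =====
def Claim_equal_solve : Prop := ∀ (N : Int), Dom_solve N → Spec_solve N (solve N)

-- ===== LEMMAS AND PROOFS =====

-- Specification counter both ports are reduced to: number of ways to extend the accumulated
-- prefix value v (flags b3/b5/b7 = digit already seen) by m digits from {3,5,7} so that the
-- final number is ≤ N and all three digits occur.
def cnt (m : Nat) (v : Int) (b3 b5 b7 : Bool) (N : Int) : Int :=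
  match m with
  | 0 => if b3 && b5 && b7 && decide (v ≤ N) then 1 else 0
  | Nat.succ m' =>
      cnt m' (v * 10 + 3) true b5 b7 N
    + cnt m' (v * 10 + 5) b3 true b7 N
    + cnt m' (v * 10 + 7) b3 b5 true N

-- ---------- B side ----------
def repu : Nat → Int
  | 0 => 0
  | m+1 => 10 * repu m + 1

theorem nine_repu (m : Nat) : 9 * repu m = 10 ^ m - 1 := by
  induction m with
  | zero => simp [repu]
  | succ m ih => rw [pow_succ]; simp only [repu]; omega

theorem floordiv_repu (m : Nat) : PySem.Int.floordiv ((10:Int) ^ m - 1) 9 = repu m := by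
  rw [PySem.Int.floordiv_eq_ediv_of_pos (by norm_num), ← nine_repu m]
  rw [Int.mul_ediv_cancel_left _ (by norm_num)]

theorem cnt_lo {N : Int} (m : Nat) (v : Int) (b3 b5 b7 : Bool)
    (h : N < v * 10 ^ m + 3 * repu m) : cnt m v b3 b5 b7 N = 0 := by
  induction m generalizing v b3 b5 b7 with
  | zero =>
      simp only [repu, pow_zero] at h
      simp [cnt, show ¬(v ≤ N) by omega]
  | succ m ih =>
      have hP : (0:Int) ≤ 10 ^ m := by positivity
      have e3 : (v * 10 + 3) * (10:Int) ^ m + 3 * repu m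
          = v * 10 ^ (m+1) + 3 * repu (m+1) := by
        rw [pow_succ]; simp only [repu]; linear_combination (-3 : Int) * nine_repu m
      have e5 : (v * 10 + 5) * (10:Int) ^ m + 3 * repu m
          = v * 10 ^ (m+1) + 3 * repu (m+1) + 2 * 10 ^ m := by
        rw [pow_succ]; simp only [repu]; linear_combination (-3 : Int) * nine_repu m
      have e7 : (v * 10 + 7) * (10:Int) ^ m + 3 * repu m
          = v * 10 ^ (m+1) + 3 * repu (m+1) + 4 * 10 ^ m := by
        rw [pow_succ]; simp only [repu]; linear_combination (-3 : Int) * nine_repu m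
      simp only [cnt]
      rw [ih _ _ _ _ (by omega), ih _ _ _ _ (by omega), ih _ _ _ _ (by omega)]
      omega

theorem cnt_hi {N : Int} (m : Nat) (v : Int) (b3 b5 b7 : Bool)
    (h : v * 10 ^ m + 7 * repu m ≤ N) :
    cnt m v b3 b5 b7 N
      = full_count m ((if b3 then 0 else 1) + (if b5 then 0 else 1) + (if b7 then 0 else 1)) := by
  induction m generalizing v b3 b5 b7 with
  | zero =>
      simp only [repu, pow_zero] at h
      have hvN : v ≤ N := by omega
      cases b3 <;> cases b5 <;> cases b7 <;>
        norm_num [cnt, full_count, hvN]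
  | succ m ih =>
      have hP : (0:Int) ≤ 10 ^ m := by positivity
      have e3 : (v * 10 + 3) * (10:Int) ^ m + 7 * repu m
          = v * 10 ^ (m+1) + 7 * repu (m+1) - 4 * 10 ^ m := by
        rw [pow_succ]; simp only [repu]; linear_combination (-7 : Int) * nine_repu m
      have e5 : (v * 10 + 5) * (10:Int) ^ m + 7 * repu m
          = v * 10 ^ (m+1) + 7 * repu (m+1) - 2 * 10 ^ m := by
        rw [pow_succ]; simp only [repu]; linear_combination (-7 : Int) * nine_repu m
      have e7 : (v * 10 + 7) * (10:Int) ^ m + 7 * repu m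
          = v * 10 ^ (m+1) + 7 * repu (m+1) := by
        rw [pow_succ]; simp only [repu]; linear_combination (-7 : Int) * nine_repu m
      simp only [cnt]
      rw [ih _ _ _ _ (by omega), ih _ _ _ _ (by omega), ih _ _ _ _ (by omega)]
      cases b3 <;> cases b5 <;> cases b7 <;>
        norm_num [full_count, pow_succ, zero_pow] <;> ring

theorem count_eq_cnt (N : Int) :
    ∀ (m : Nat) (v : Int) (b3 b5 b7 : Bool), count m v b3 b5 b7 N = cnt m v b3 b5 b7 N := by
  intro m
  induction m with
  | zero =>
      intro v b3 b5 b7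
      simp only [count, floordiv_repu]
      by_cases h1 : v * 10 ^ 0 + 3 * repu 0 > N
      · rw [if_pos h1]
        exact (cnt_lo 0 v b3 b5 b7 h1).symm
      · rw [if_neg h1]
        by_cases h2 : v * 10 ^ 0 + 7 * repu 0 ≤ N
        · rw [if_pos h2]
          exact (cnt_hi 0 v b3 b5 b7 h2).symm
        · exfalso
          simp only [repu, pow_zero] at h1 h2
          omega
  | succ m ih =>
      intro v b3 b5 b7
      simp only [count, floordiv_repu]
      by_cases h1 : v * 10 ^ (m+1) + 3 * repu (m+1) > N
      · rw [if_pos h1]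
        exact (cnt_lo (m+1) v b3 b5 b7 h1).symm
      · rw [if_neg h1]
        by_cases h2 : v * 10 ^ (m+1) + 7 * repu (m+1) ≤ N
        · rw [if_pos h2]
          exact (cnt_hi (m+1) v b3 b5 b7 h2).symm
        · rw [if_neg h2]
          simp only [cnt, ih]

-- ---------- A side ----------
-- value of the digit string cs appended after an accumulated value v (what int() returns)
def valOf (v : Int) (cs : List Char) : Int :=
  cs.foldl (fun a c => a * 10 + ((c.toNat : Int) - 48)) v

def pchk (l : List (List Char)) : Bool :=
  l.all fun cs => PySem.Int.ofChars? cs == some (valOf 0 cs)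

set_option maxRecDepth 40000 in
theorem pchk1 : pchk (prodA 1) = true := by decide
set_option maxRecDepth 40000 in
theorem pchk2 : pchk (prodA 2) = true := by decide
set_option maxRecDepth 40000 in
theorem pchk3 : pchk (prodA 3) = true := by decide
set_option maxRecDepth 40000 in
theorem pchk4 : pchk (prodA 4) = true := by decide
set_option maxRecDepth 40000 in
theorem pchk5 : pchk (prodA 5) = true := by decide
set_option maxRecDepth 40000 in
theorem pchk6 : pchk (prodA 6) = true := by decide
set_option maxRecDepth 40000 in
theorem pchk7 : pchk (prodA 7) = true := by decide
set_option maxRecDepth 40000 in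
theorem pchk8 : pchk (prodA 8) = true := by decide
set_option maxRecDepth 40000 in
theorem pchk9a : pchk ((prodA 8).map (fun cs => '3' :: cs)) = true := by decide
set_option maxRecDepth 40000 in
theorem pchk9b : pchk ((prodA 8).map (fun cs => '5' :: cs)) = true := by decide
set_option maxRecDepth 40000 in
theorem pchk9c : pchk ((prodA 8).map (fun cs => '7' :: cs)) = true := by decide

theorem parse_of_chunk {l : List (List Char)} (hl : pchk l = true) {cs : List Char}
    (h : cs ∈ l) : PySem.Int.ofChars? cs = some (valOf 0 cs) :=
  eq_of_beq (List.all_eq_true.mp hl cs h)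

theorem parse_ok (k : Nat) (hk1 : 1 ≤ k) (hk9 : k ≤ 9) {cs : List Char} (h : cs ∈ prodA k) :
    PySem.Int.ofChars? cs = some (valOf 0 cs) := by
  interval_cases k
  · exact parse_of_chunk pchk1 h
  · exact parse_of_chunk pchk2 h
  · exact parse_of_chunk pchk3 h
  · exact parse_of_chunk pchk4 h
  · exact parse_of_chunk pchk5 h
  · exact parse_of_chunk pchk6 h
  · exact parse_of_chunk pchk7 h
  · exact parse_of_chunk pchk8 h
  · have h9 : prodA 9 = ['3','5','7'].flatMap (fun c => (prodA 8).map (c :: ·)) := rfl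
    rw [h9] at h
    rcases List.mem_flatMap.mp h with ⟨c, hc, hcs⟩
    simp only [List.mem_cons, List.not_mem_nil, or_false] at hc
    rcases hc with rfl | rfl | rfl
    · exact parse_of_chunk pchk9a hcs
    · exact parse_of_chunk pchk9b hcs
    · exact parse_of_chunk pchk9c hcs

theorem countP_prodA (N : Int) :
    ∀ (m : Nat) (v : Int) (b3 b5 b7 : Bool),
      ((prodA m).countP (fun cs =>
          (b3 || cs.contains '3') && (b5 || cs.contains '5') && (b7 || cs.contains '7')
            && decide (valOf v cs ≤ N)) : Int)
        = cnt m v b3 b5 b7 N := by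
  intro m
  induction m with
  | zero =>
      intro v b3 b5 b7
      simp [prodA, cnt, List.countP, List.countP.go, valOf]
      cases b3 <;> cases b5 <;> cases b7 <;> by_cases h : v ≤ N <;> simp [h]
  | succ m ih =>
      intro v b3 b5 b7
      show ((['3','5','7'].flatMap (fun c => (prodA m).map (c :: ·))).countP _ : Int) = _
      simp only [List.flatMap_cons, List.flatMap_nil, List.append_nil, List.countP_append,
        List.countP_map]
      have h3 : List.countP ((fun cs =>
            (b3 || cs.contains '3') && (b5 || cs.contains '5') && (b7 || cs.contains '7')
              && decide (valOf v cs ≤ N)) ∘ (fun x => '3' :: x)) (prodA m)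
          = List.countP (fun cs =>
            (true || cs.contains '3') && (b5 || cs.contains '5') && (b7 || cs.contains '7')
              && decide (valOf (v * 10 + 3) cs ≤ N)) (prodA m) :=
        List.countP_congr (fun cs _ => by
          simp [valOf])
      have h5 : List.countP ((fun cs =>
            (b3 || cs.contains '3') && (b5 || cs.contains '5') && (b7 || cs.contains '7')
              && decide (valOf v cs ≤ N)) ∘ (fun x => '5' :: x)) (prodA m)
          = List.countP (fun cs =>
            (b3 || cs.contains '3') && (true || cs.contains '5') && (b7 || cs.contains '7')
              && decide (valOf (v * 10 + 5) cs ≤ N)) (prodA m) :=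
        List.countP_congr (fun cs _ => by
          simp [valOf])
      have h7 : List.countP ((fun cs =>
            (b3 || cs.contains '3') && (b5 || cs.contains '5') && (b7 || cs.contains '7')
              && decide (valOf v cs ≤ N)) ∘ (fun x => '7' :: x)) (prodA m)
          = List.countP (fun cs =>
            (b3 || cs.contains '3') && (b5 || cs.contains '5') && (true || cs.contains '7')
              && decide (valOf (v * 10 + 7) cs ≤ N)) (prodA m) :=
        List.countP_congr (fun cs _ => by
          simp [valOf])
      rw [h3, h5, h7, ]
      have r3 := ih (v * 10 + 3) true b5 b7
      have r5 := ih (v * 10 + 5) b3 true b7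
      have r7 := ih (v * 10 + 7) b3 b5 true
      push_cast
      rw [r3, r5, r7]
      simp only [cnt]
      omega

theorem inner_eq (N : Int) (k : Nat) (hk1 : 1 ≤ k) (hk9 : k ≤ 9) (s : Int) :
    (prodA k).foldl (fun sum i =>
      if i.contains '3' && i.contains '5' && i.contains '7' then
        if (PySem.Int.ofChars? i).getD 0 ≤ N then sum + 1 else sum
      else sum) s
    = s + cnt k 0 false false false N := by
  have hcong := PySem.List.foldl_congr_mem (prodA k)
    (fun sum i =>
      if i.contains '3' && i.contains '5' && i.contains '7' then
        if (PySem.Int.ofChars? i).getD 0 ≤ N then sum + 1 else sum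
      else sum)
    (fun sum cs =>
      if (cs.contains '3' && cs.contains '5' && cs.contains '7') && decide (valOf 0 cs ≤ N)
      then sum + 1 else sum)
    s
    (by
      intro acc cs hmem
      cases hg : (cs.contains '3' && cs.contains '5' && cs.contains '7') with
      | false => simp only [hg, Bool.false_and]; simp
      | true =>
          simp only [hg, if_true, Bool.true_and]
          rw [parse_ok k hk1 hk9 hmem]
          by_cases hd : valOf 0 cs ≤ N <;> simp [hd])
  rw [hcong, PySem.List.foldl_if_add_one]
  have hp : List.countP (fun cs =>
        (cs.contains '3' && cs.contains '5' && cs.contains '7') && decide (valOf 0 cs ≤ N))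
        (prodA k)
      = List.countP (fun cs =>
        cs.contains '3' && cs.contains '5' && cs.contains '7' && decide (valOf 0 cs ≤ N))
        (prodA k) :=
    List.countP_congr (fun cs _ => by simp [Bool.and_assoc])
  rw [hp]
  have hc := countP_prodA N k 0 false false false
  simp only [Bool.false_or] at hc
  rw [hc]

-- ===== VERDICT (by name: the statement is the Claim_ definition above) =====
theorem solve_spec : Claim_equal_solve := by
  intro N _
  unfold Spec_solve solve solve_alt
  rw [show PySem.List.pyRange 1 10 1 = [1,2,3,4,5,6,7,8,9] from by decide]
  simp only [List.foldl_cons, List.foldl_nil, List.map_cons, List.map_nil, List.sum_cons,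
    List.sum_nil, Int.toNat_one,
    show ((2:Int).toNat) = 2 from rfl, show ((3:Int).toNat) = 3 from rfl,
    show ((4:Int).toNat) = 4 from rfl, show ((5:Int).toNat) = 5 from rfl,
    show ((6:Int).toNat) = 6 from rfl, show ((7:Int).toNat) = 7 from rfl,
    show ((8:Int).toNat) = 8 from rfl, show ((9:Int).toNat) = 9 from rfl]
  rw [inner_eq N 1 (by norm_num) (by norm_num), inner_eq N 2 (by norm_num) (by norm_num),
      inner_eq N 3 (by norm_num) (by norm_num), inner_eq N 4 (by norm_num) (by norm_num),
      inner_eq N 5 (by norm_num) (by norm_num), inner_eq N 6 (by norm_num) (by norm_num),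
      inner_eq N 7 (by norm_num) (by norm_num), inner_eq N 8 (by norm_num) (by norm_num),
      inner_eq N 9 (by norm_num) (by norm_num)]
  simp only [count_eq_cnt]
  omega
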